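-- pv_equiv track=rewrite | github.com/MAOJIASONG/VisualReasonBench | Stacking_scaling/polypuzzle_batch.py | has_forbidden_2x3_plane
-- ===== SOURCE A (Python) =====
-- from typing import List, Tuple, Set, Dict
--
-- Vec = Tuple[int,int,int]
--
-- def has_forbidden_2x3_plane(piece: Set[Vec]) -> bool:
--     S = set(piece)
--     xs = [x for x,_,_ in S]; ys = [y for _,y,_ in S]; zs = [z for *_,z in S]
--     minx,maxx=min(xs),max(xs); miny,maxy=min(ys),max(ys); minz,maxz=min(zs),max(zs)
--     # XY
--     for z in range(minz, maxz+1):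
--         for x0 in range(minx, maxx):
--             for y0 in range(miny, maxy-1):
--                 rect={(x0,y0,z),(x0+1,y0,z),(x0,y0+1,z),(x0+1,y0+1,z),(x0,y0+2,z),(x0+1,y0+2,z)}
--                 if rect.issubset(S): return True
--         for x0 in range(minx, maxx-1):
--             for y0 in range(miny, maxy):
--                 rect={(x0,y0,z),(x0+1,y0,z),(x0+2,y0,z),(x0,y0+1,z),(x0+1,y0+1,z),(x0+2,y0+1,z)}
--                 if rect.issubset(S): return True
--     # YZ
--     for x in range(minx, maxx+1):
--         for y0 in range(miny, maxy):
--             for z0 in range(minz, maxz-1):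
--                 rect={(x,y0,z0),(x,y0+1,z0),(x,y0+2,z0),(x,y0,z0+1),(x,y0+1,z0+1),(x,y0+2,z0+1)}
--                 if rect.issubset(S): return True
--         for y0 in range(miny, maxy-1):
--             for z0 in range(minz, maxz):
--                 rect={(x,y0,z0),(x,y0+1,z0),(x,y0+2,z0),(x,y0,z0+1),(x,y0+1,z0+1),(x,y0+2,z0+1)}
--                 if rect.issubset(S): return True
--     # XZ
--     for y in range(miny, maxy+1):
--         for x0 in range(minx, maxx):
--             for z0 in range(minz, maxz-1):
--                 rect={(x0,y,z0),(x0+1,y,z0),(x0,y,z0+1),(x0+1,y,z0+1),(x0,y,z0+2),(x0+1,y,z0+2)}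
--                 if rect.issubset(S): return True
--         for x0 in range(minx, maxx-1):
--             for z0 in range(minz, maxz):
--                 rect={(x0,y,z0),(x0+1,y,z0),(x0+2,y,z0),(x0,y,z0+1),(x0+1,y,z0+1),(x0+2,y,z0+1)}
--                 if rect.issubset(S): return True
--     return False
-- ===== SOURCE B (Python) =====
-- # B: anchor-and-template scan over occupied cells only (O(|S|)); also checks the
-- # 2(y)x3(z) YZ orientation that A's copy-pasted second YZ loop misses.
-- _OFFS = [
--     [(0,0,0),(1,0,0),(0,1,0),(1,1,0),(0,2,0),(1,2,0)],  # XY: 2 in x, 3 in y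
--     [(0,0,0),(1,0,0),(2,0,0),(0,1,0),(1,1,0),(2,1,0)],  # XY: 3 in x, 2 in y
--     [(0,0,0),(0,1,0),(0,2,0),(0,0,1),(0,1,1),(0,2,1)],  # YZ: 3 in y, 2 in z
--     [(0,0,0),(0,1,0),(0,0,1),(0,1,1),(0,0,2),(0,1,2)],  # YZ: 2 in y, 3 in z
--     [(0,0,0),(1,0,0),(0,0,1),(1,0,1),(0,0,2),(1,0,2)],  # XZ: 2 in x, 3 in z
--     [(0,0,0),(1,0,0),(2,0,0),(0,0,1),(1,0,1),(2,0,1)],  # XZ: 3 in x, 2 in z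
-- ]
--
-- def has_forbidden_2x3_plane(piece):
--     S = set(piece)
--     return any(all((x+dx, y+dy, z+dz) in S for dx, dy, dz in offs)
--                for x, y, z in S for offs in _OFFS)
-- ===== Notes on version B (the rewrite author's own statement) =====
-- stated objective: faster
-- what changed: B replaces A's triple nested range scans over the whole bounding box by a single pass over the occupied cells, checking six fixed 2x3 rectangle templates anchored at each cell against the set; B also tests the 2(y)x3(z) YZ orientation that A's copy-pasted second YZ loop never checks.
-- intended difference: On pieces whose only forbidden 2x3 plate is YZ-oriented with 2 cells along y and 3 along z, A returns False (its second YZ loop re-checks the 3y*2z template instead of the 2y*3z one) while B returns True, the intended answer since such a plate is a forbidden 2x3 plane. — e.g. on has_forbidden_2x3_plane([(0,0,0),(0,1,0),(0,0,1),(0,1,1),(0,0,2),(0,1,2)]): A returns false, B returns true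
import Mathlib
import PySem

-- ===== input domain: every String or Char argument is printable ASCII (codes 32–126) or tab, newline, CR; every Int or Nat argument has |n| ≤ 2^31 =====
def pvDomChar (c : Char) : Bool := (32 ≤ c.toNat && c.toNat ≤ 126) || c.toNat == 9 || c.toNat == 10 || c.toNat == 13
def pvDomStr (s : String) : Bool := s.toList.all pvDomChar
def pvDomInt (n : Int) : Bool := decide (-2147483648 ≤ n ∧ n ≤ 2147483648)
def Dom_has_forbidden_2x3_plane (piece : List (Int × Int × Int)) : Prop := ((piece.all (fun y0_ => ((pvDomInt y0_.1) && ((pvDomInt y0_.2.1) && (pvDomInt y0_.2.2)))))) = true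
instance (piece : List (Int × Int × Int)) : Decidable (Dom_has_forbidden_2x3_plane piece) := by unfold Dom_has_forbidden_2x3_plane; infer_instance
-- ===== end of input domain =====

-- B replaces A's triple bounding-box range scans by a template check anchored at each
-- occupied cell (O(|S|) vs O(bounding-box volume)); B also checks the 2(y)x3(z) YZ
-- orientation that A's copy-pasted second YZ loop never tests (see D_ below).

-- ===== PORT A =====
-- min(l) / max(l) of a nonempty int list (Python raises ValueError on []; Pre_ excludes it)
def pvMinOf (l : List Int) : Int := (PySem.List.min? l (fun v => v)).getD 0
def pvMaxOf (l : List Int) : Int := (PySem.List.max? l (fun v => v)).getD 0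

def has_forbidden_2x3_plane (piece : List (Int × Int × Int)) : Bool :=
  let S := PySem.Set.ofList piece
  let xs := S.map (fun c => c.1)
  let ys := S.map (fun c => c.2.1)
  let zs := S.map (fun c => c.2.2)
  let minx := pvMinOf xs; let maxx := pvMaxOf xs
  let miny := pvMinOf ys; let maxy := pvMaxOf ys
  let minz := pvMinOf zs; let maxz := pvMaxOf zs
  -- sequential loops with early 'return True' = boolean or of the scans
  -- XY
  ((PySem.List.pyRange minz (maxz+1) 1).any fun z =>
      ((PySem.List.pyRange minx maxx 1).any fun x0 =>
        (PySem.List.pyRange miny (maxy-1) 1).any fun y0 =>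
          ([(x0,y0,z),(x0+1,y0,z),(x0,y0+1,z),(x0+1,y0+1,z),(x0,y0+2,z),(x0+1,y0+2,z)] :
            List (Int × Int × Int)).all (fun c => PySem.Set.contains S c))
      ||
      ((PySem.List.pyRange minx (maxx-1) 1).any fun x0 =>
        (PySem.List.pyRange miny maxy 1).any fun y0 =>
          ([(x0,y0,z),(x0+1,y0,z),(x0+2,y0,z),(x0,y0+1,z),(x0+1,y0+1,z),(x0+2,y0+1,z)] :
            List (Int × Int × Int)).all (fun c => PySem.Set.contains S c)))
  ||
  -- YZ
  ((PySem.List.pyRange minx (maxx+1) 1).any fun x =>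
      ((PySem.List.pyRange miny maxy 1).any fun y0 =>
        (PySem.List.pyRange minz (maxz-1) 1).any fun z0 =>
          ([(x,y0,z0),(x,y0+1,z0),(x,y0+2,z0),(x,y0,z0+1),(x,y0+1,z0+1),(x,y0+2,z0+1)] :
            List (Int × Int × Int)).all (fun c => PySem.Set.contains S c))
      ||
      ((PySem.List.pyRange miny (maxy-1) 1).any fun y0 =>
        (PySem.List.pyRange minz maxz 1).any fun z0 =>
          ([(x,y0,z0),(x,y0+1,z0),(x,y0+2,z0),(x,y0,z0+1),(x,y0+1,z0+1),(x,y0+2,z0+1)] :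
            List (Int × Int × Int)).all (fun c => PySem.Set.contains S c)))
  ||
  -- XZ
  ((PySem.List.pyRange miny (maxy+1) 1).any fun y =>
      ((PySem.List.pyRange minx maxx 1).any fun x0 =>
        (PySem.List.pyRange minz (maxz-1) 1).any fun z0 =>
          ([(x0,y,z0),(x0+1,y,z0),(x0,y,z0+1),(x0+1,y,z0+1),(x0,y,z0+2),(x0+1,y,z0+2)] :
            List (Int × Int × Int)).all (fun c => PySem.Set.contains S c))
      ||
      ((PySem.List.pyRange minx (maxx-1) 1).any fun x0 =>
        (PySem.List.pyRange minz maxz 1).any fun z0 =>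
          ([(x0,y,z0),(x0+1,y,z0),(x0+2,y,z0),(x0,y,z0+1),(x0+1,y,z0+1),(x0+2,y,z0+1)] :
            List (Int × Int × Int)).all (fun c => PySem.Set.contains S c)))

-- ===== PORT B =====
def pvOffs : List (List (Int × Int × Int)) :=
  [ [(0,0,0),(1,0,0),(0,1,0),(1,1,0),(0,2,0),(1,2,0)],  -- XY: 2 in x, 3 in y
    [(0,0,0),(1,0,0),(2,0,0),(0,1,0),(1,1,0),(2,1,0)],  -- XY: 3 in x, 2 in y
    [(0,0,0),(0,1,0),(0,2,0),(0,0,1),(0,1,1),(0,2,1)],  -- YZ: 3 in y, 2 in z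
    [(0,0,0),(0,1,0),(0,0,1),(0,1,1),(0,0,2),(0,1,2)],  -- YZ: 2 in y, 3 in z
    [(0,0,0),(1,0,0),(0,0,1),(1,0,1),(0,0,2),(1,0,2)],  -- XZ: 2 in x, 3 in z
    [(0,0,0),(1,0,0),(2,0,0),(0,0,1),(1,0,1),(2,0,1)] ] -- XZ: 3 in x, 2 in z

def has_forbidden_2x3_plane_alt (piece : List (Int × Int × Int)) : Bool :=
  let S := PySem.Set.ofList piece
  S.any (fun c => pvOffs.any (fun offs =>
    offs.all (fun d => PySem.Set.contains S (c.1 + d.1, c.2.1 + d.2.1, c.2.2 + d.2.2))))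

-- ===== PRECONDITION & SPEC =====
-- Pre_ excludes only the empty list, on which Python's min() raises ValueError.
def Pre_has_forbidden_2x3_plane (piece : List (Int × Int × Int)) : Prop := piece ≠ []
instance (piece : List (Int × Int × Int)) : Decidable (Pre_has_forbidden_2x3_plane piece) := by
  unfold Pre_has_forbidden_2x3_plane; infer_instance

def pvWitness_has_forbidden_2x3_plane : (List (Int × Int × Int)) := [(0, 0, 0), (1, 2, 3)]

-- 'piece contains an a*b axis-aligned rectangle of cells spanned by the directions
-- (ex,ey,ez) and (fx,fy,fz) from some anchor cell' — a closed-form condition on the input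
def pvPlate (piece : List (Int × Int × Int)) (ex ey ez fx fy fz : Int) (a b : Nat) : Prop :=
  ∃ c ∈ piece, ∀ i : Nat, i < a → ∀ j : Nat, j < b →
    (c.1 + i * ex + j * fx, c.2.1 + i * ey + j * fy, c.2.2 + i * ez + j * fz) ∈ piece

-- On pieces whose only forbidden 2x3 plate is YZ-oriented with 2 cells along y and 3 along z,
-- A returns False (its copy-pasted second YZ loop re-checks the 3y*2z template instead) while
-- B returns True, which is the intended answer: such a plate is a forbidden 2x3 plane.
def D_has_forbidden_2x3_plane (piece : List (Int × Int × Int)) : Prop :=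
  pvPlate piece 0 1 0 0 0 1 2 3 ∧
  ¬ (pvPlate piece 1 0 0 0 1 0 2 3 ∨
     pvPlate piece 1 0 0 0 1 0 3 2 ∨
     pvPlate piece 0 1 0 0 0 1 3 2 ∨
     pvPlate piece 1 0 0 0 0 1 2 3 ∨
     pvPlate piece 1 0 0 0 0 1 3 2)
instance (piece : List (Int × Int × Int)) : Decidable (D_has_forbidden_2x3_plane piece) := by
  unfold D_has_forbidden_2x3_plane
  have i0 : Decidable (pvPlate piece 0 1 0 0 0 1 2 3) := by unfold pvPlate; infer_instance
  have i1 : Decidable (pvPlate piece 1 0 0 0 1 0 2 3) := by unfold pvPlate; infer_instance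
  have i2 : Decidable (pvPlate piece 1 0 0 0 1 0 3 2) := by unfold pvPlate; infer_instance
  have i3 : Decidable (pvPlate piece 0 1 0 0 0 1 3 2) := by unfold pvPlate; infer_instance
  have i4 : Decidable (pvPlate piece 1 0 0 0 0 1 2 3) := by unfold pvPlate; infer_instance
  have i5 : Decidable (pvPlate piece 1 0 0 0 0 1 3 2) := by unfold pvPlate; infer_instance
  infer_instance

def Spec_has_forbidden_2x3_plane (piece : List (Int × Int × Int)) (out : Bool) : Prop :=
  ¬ D_has_forbidden_2x3_plane piece → out = has_forbidden_2x3_plane_alt piece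
instance (piece : List (Int × Int × Int)) (out : Bool) : Decidable (Spec_has_forbidden_2x3_plane piece out) := by
  unfold Spec_has_forbidden_2x3_plane; infer_instance

def pvDiffWitness_has_forbidden_2x3_plane : (List (Int × Int × Int)) :=
  [(0,0,0),(0,1,0),(0,0,1),(0,1,1),(0,0,2),(0,1,2)]
def pvDiffWitnessOut_has_forbidden_2x3_plane : Bool × Bool := (false, true)

-- ===== CLAIM (what is proved, stated in full; the proofs are below) =====
def Claim_unchanged_has_forbidden_2x3_plane : Prop := ∀ (piece : List (Int × Int × Int)), Dom_has_forbidden_2x3_plane piece → Pre_has_forbidden_2x3_plane piece → Spec_has_forbidden_2x3_plane piece (has_forbidden_2x3_plane piece)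
def Claim_changed_has_forbidden_2x3_plane : Prop := Dom_has_forbidden_2x3_plane (pvDiffWitness_has_forbidden_2x3_plane) ∧ Pre_has_forbidden_2x3_plane (pvDiffWitness_has_forbidden_2x3_plane) ∧ D_has_forbidden_2x3_plane (pvDiffWitness_has_forbidden_2x3_plane) ∧ has_forbidden_2x3_plane (pvDiffWitness_has_forbidden_2x3_plane) = pvDiffWitnessOut_has_forbidden_2x3_plane.1 ∧ has_forbidden_2x3_plane_alt (pvDiffWitness_has_forbidden_2x3_plane) = pvDiffWitnessOut_has_forbidden_2x3_plane.2 ∧ pvDiffWitnessOut_has_forbidden_2x3_plane.1 ≠ pvDiffWitnessOut_has_forbidden_2x3_plane.2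
def Claim_exact_has_forbidden_2x3_plane : Prop := ∀ (piece : List (Int × Int × Int)), Dom_has_forbidden_2x3_plane piece → Pre_has_forbidden_2x3_plane piece → D_has_forbidden_2x3_plane piece → has_forbidden_2x3_plane piece ≠ has_forbidden_2x3_plane_alt piece

-- ===== LEMMAS AND PROOFS =====

def pvHasTemplate (piece : List (Int × Int × Int)) (offs : List (Int × Int × Int)) : Prop :=
  ∃ c ∈ piece, ∀ d ∈ offs, (c.1 + d.1, c.2.1 + d.2.1, c.2.2 + d.2.2) ∈ piece

theorem pvPlate_iff0 (piece : List (Int × Int × Int)) :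
    pvPlate piece 1 0 0 0 1 0 2 3 ↔ pvHasTemplate piece [(0,0,0),(1,0,0),(0,1,0),(1,1,0),(0,2,0),(1,2,0)] := by
  unfold pvPlate pvHasTemplate
  constructor
  · rintro ⟨c, hc, h⟩
    refine ⟨c, hc, ?_⟩
    simp only [List.forall_mem_cons, List.not_mem_nil, false_implies, forall_const, and_true]
    refine ⟨?_, ?_, ?_, ?_, ?_, ?_⟩
    · simpa using h 0 (by omega) 0 (by omega)
    · simpa using h 1 (by omega) 0 (by omega)
    · simpa using h 0 (by omega) 1 (by omega)
    · simpa using h 1 (by omega) 1 (by omega)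
    · simpa using h 0 (by omega) 2 (by omega)
    · simpa using h 1 (by omega) 2 (by omega)
  · rintro ⟨c, hc, h⟩
    simp only [List.forall_mem_cons, List.not_mem_nil, false_implies, forall_const, and_true] at h
    obtain ⟨m1, m2, m3, m4, m5, m6⟩ := h
    refine ⟨c, hc, ?_⟩
    intro i hi j hj
    interval_cases i <;> interval_cases j <;> norm_num <;> simp_all

theorem pvPlate_iff1 (piece : List (Int × Int × Int)) :
    pvPlate piece 1 0 0 0 1 0 3 2 ↔ pvHasTemplate piece [(0,0,0),(1,0,0),(2,0,0),(0,1,0),(1,1,0),(2,1,0)] := by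
  unfold pvPlate pvHasTemplate
  constructor
  · rintro ⟨c, hc, h⟩
    refine ⟨c, hc, ?_⟩
    simp only [List.forall_mem_cons, List.not_mem_nil, false_implies, forall_const, and_true]
    refine ⟨?_, ?_, ?_, ?_, ?_, ?_⟩
    · simpa using h 0 (by omega) 0 (by omega)
    · simpa using h 1 (by omega) 0 (by omega)
    · simpa using h 2 (by omega) 0 (by omega)
    · simpa using h 0 (by omega) 1 (by omega)
    · simpa using h 1 (by omega) 1 (by omega)
    · simpa using h 2 (by omega) 1 (by omega)
  · rintro ⟨c, hc, h⟩
    simp only [List.forall_mem_cons, List.not_mem_nil, false_implies, forall_const, and_true] at h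
    obtain ⟨m1, m2, m3, m4, m5, m6⟩ := h
    refine ⟨c, hc, ?_⟩
    intro i hi j hj
    interval_cases i <;> interval_cases j <;> norm_num <;> simp_all

theorem pvPlate_iff2 (piece : List (Int × Int × Int)) :
    pvPlate piece 0 1 0 0 0 1 3 2 ↔ pvHasTemplate piece [(0,0,0),(0,1,0),(0,2,0),(0,0,1),(0,1,1),(0,2,1)] := by
  unfold pvPlate pvHasTemplate
  constructor
  · rintro ⟨c, hc, h⟩
    refine ⟨c, hc, ?_⟩
    simp only [List.forall_mem_cons, List.not_mem_nil, false_implies, forall_const, and_true]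
    refine ⟨?_, ?_, ?_, ?_, ?_, ?_⟩
    · simpa using h 0 (by omega) 0 (by omega)
    · simpa using h 1 (by omega) 0 (by omega)
    · simpa using h 2 (by omega) 0 (by omega)
    · simpa using h 0 (by omega) 1 (by omega)
    · simpa using h 1 (by omega) 1 (by omega)
    · simpa using h 2 (by omega) 1 (by omega)
  · rintro ⟨c, hc, h⟩
    simp only [List.forall_mem_cons, List.not_mem_nil, false_implies, forall_const, and_true] at h
    obtain ⟨m1, m2, m3, m4, m5, m6⟩ := h
    refine ⟨c, hc, ?_⟩
    intro i hi j hj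
    interval_cases i <;> interval_cases j <;> norm_num <;> simp_all

theorem pvPlate_iff3 (piece : List (Int × Int × Int)) :
    pvPlate piece 0 1 0 0 0 1 2 3 ↔ pvHasTemplate piece [(0,0,0),(0,1,0),(0,0,1),(0,1,1),(0,0,2),(0,1,2)] := by
  unfold pvPlate pvHasTemplate
  constructor
  · rintro ⟨c, hc, h⟩
    refine ⟨c, hc, ?_⟩
    simp only [List.forall_mem_cons, List.not_mem_nil, false_implies, forall_const, and_true]
    refine ⟨?_, ?_, ?_, ?_, ?_, ?_⟩
    · simpa using h 0 (by omega) 0 (by omega)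
    · simpa using h 1 (by omega) 0 (by omega)
    · simpa using h 0 (by omega) 1 (by omega)
    · simpa using h 1 (by omega) 1 (by omega)
    · simpa using h 0 (by omega) 2 (by omega)
    · simpa using h 1 (by omega) 2 (by omega)
  · rintro ⟨c, hc, h⟩
    simp only [List.forall_mem_cons, List.not_mem_nil, false_implies, forall_const, and_true] at h
    obtain ⟨m1, m2, m3, m4, m5, m6⟩ := h
    refine ⟨c, hc, ?_⟩
    intro i hi j hj
    interval_cases i <;> interval_cases j <;> norm_num <;> simp_all

theorem pvPlate_iff4 (piece : List (Int × Int × Int)) :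
    pvPlate piece 1 0 0 0 0 1 2 3 ↔ pvHasTemplate piece [(0,0,0),(1,0,0),(0,0,1),(1,0,1),(0,0,2),(1,0,2)] := by
  unfold pvPlate pvHasTemplate
  constructor
  · rintro ⟨c, hc, h⟩
    refine ⟨c, hc, ?_⟩
    simp only [List.forall_mem_cons, List.not_mem_nil, false_implies, forall_const, and_true]
    refine ⟨?_, ?_, ?_, ?_, ?_, ?_⟩
    · simpa using h 0 (by omega) 0 (by omega)
    · simpa using h 1 (by omega) 0 (by omega)
    · simpa using h 0 (by omega) 1 (by omega)
    · simpa using h 1 (by omega) 1 (by omega)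
    · simpa using h 0 (by omega) 2 (by omega)
    · simpa using h 1 (by omega) 2 (by omega)
  · rintro ⟨c, hc, h⟩
    simp only [List.forall_mem_cons, List.not_mem_nil, false_implies, forall_const, and_true] at h
    obtain ⟨m1, m2, m3, m4, m5, m6⟩ := h
    refine ⟨c, hc, ?_⟩
    intro i hi j hj
    interval_cases i <;> interval_cases j <;> norm_num <;> simp_all

theorem pvPlate_iff5 (piece : List (Int × Int × Int)) :
    pvPlate piece 1 0 0 0 0 1 3 2 ↔ pvHasTemplate piece [(0,0,0),(1,0,0),(2,0,0),(0,0,1),(1,0,1),(2,0,1)] := by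
  unfold pvPlate pvHasTemplate
  constructor
  · rintro ⟨c, hc, h⟩
    refine ⟨c, hc, ?_⟩
    simp only [List.forall_mem_cons, List.not_mem_nil, false_implies, forall_const, and_true]
    refine ⟨?_, ?_, ?_, ?_, ?_, ?_⟩
    · simpa using h 0 (by omega) 0 (by omega)
    · simpa using h 1 (by omega) 0 (by omega)
    · simpa using h 2 (by omega) 0 (by omega)
    · simpa using h 0 (by omega) 1 (by omega)
    · simpa using h 1 (by omega) 1 (by omega)
    · simpa using h 2 (by omega) 1 (by omega)
  · rintro ⟨c, hc, h⟩
    simp only [List.forall_mem_cons, List.not_mem_nil, false_implies, forall_const, and_true] at h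
    obtain ⟨m1, m2, m3, m4, m5, m6⟩ := h
    refine ⟨c, hc, ?_⟩
    intro i hi j hj
    interval_cases i <;> interval_cases j <;> norm_num <;> simp_all


theorem pvMin_le {l : List Int} {x : Int} (hx : x ∈ l) : pvMinOf l ≤ x := by
  have hne : l ≠ [] := by rintro rfl; simp at hx
  obtain ⟨m, hm⟩ := Option.ne_none_iff_exists'.1
    (fun h => hne ((PySem.List.min?_eq_none_iff l (fun v => v)).1 h))
  unfold pvMinOf; rw [hm]; exact PySem.List.min?_isMin hm x hx

theorem le_pvMax {l : List Int} {x : Int} (hx : x ∈ l) : x ≤ pvMaxOf l := by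
  have hne : l ≠ [] := by rintro rfl; simp at hx
  obtain ⟨m, hm⟩ := Option.ne_none_iff_exists'.1
    (fun h => hne ((PySem.List.max?_eq_none_iff l (fun v => v)).1 h))
  unfold pvMaxOf; rw [hm]; exact PySem.List.max?_isMax hm x hx

theorem pv_mem_coord {piece : List (Int × Int × Int)} {c : Int × Int × Int}
    (hc : c ∈ piece) (f : (Int × Int × Int) → Int) :
    f c ∈ (PySem.Set.ofList piece).map f :=
  List.mem_map_of_mem ((PySem.Set.mem_ofList piece c).2 hc)

theorem pvB_iff (piece : List (Int × Int × Int)) :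
    has_forbidden_2x3_plane_alt piece = true ↔
      (pvHasTemplate piece [(0,0,0),(1,0,0),(0,1,0),(1,1,0),(0,2,0),(1,2,0)] ∨
       pvHasTemplate piece [(0,0,0),(1,0,0),(2,0,0),(0,1,0),(1,1,0),(2,1,0)] ∨
       pvHasTemplate piece [(0,0,0),(0,1,0),(0,2,0),(0,0,1),(0,1,1),(0,2,1)] ∨
       pvHasTemplate piece [(0,0,0),(0,1,0),(0,0,1),(0,1,1),(0,0,2),(0,1,2)] ∨
       pvHasTemplate piece [(0,0,0),(1,0,0),(0,0,1),(1,0,1),(0,0,2),(1,0,2)] ∨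
       pvHasTemplate piece [(0,0,0),(1,0,0),(2,0,0),(0,0,1),(1,0,1),(2,0,1)]) := by
  simp only [has_forbidden_2x3_plane_alt, pvOffs, pvHasTemplate, List.any_eq_true,
    List.any_cons, List.any_nil, List.all_cons, List.all_nil, Bool.or_eq_true, Bool.and_eq_true,
    Bool.false_eq_true, or_false, and_true, PySem.Set.contains_iff, PySem.Set.mem_ofList,
    List.forall_mem_cons, List.not_mem_nil, false_implies, forall_const, and_true]
  constructor
  · rintro ⟨c, hc, h⟩
    rcases h with (h|h|h|h|h|h) <;> [exact Or.inl ⟨c,hc,h⟩; exact Or.inr (Or.inl ⟨c,hc,h⟩); exact Or.inr (Or.inr (Or.inl ⟨c,hc,h⟩)); exact Or.inr (Or.inr (Or.inr (Or.inl ⟨c,hc,h⟩))); exact Or.inr (Or.inr (Or.inr (Or.inr (Or.inl ⟨c,hc,h⟩)))); exact Or.inr (Or.inr (Or.inr (Or.inr (Or.inr ⟨c,hc,h⟩))))]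
  · rintro (⟨c,hc,h⟩|⟨c,hc,h⟩|⟨c,hc,h⟩|⟨c,hc,h⟩|⟨c,hc,h⟩|⟨c,hc,h⟩)
    exacts [⟨c,hc,Or.inl h⟩, ⟨c,hc,Or.inr (Or.inl h)⟩, ⟨c,hc,Or.inr (Or.inr (Or.inl h))⟩,
      ⟨c,hc,Or.inr (Or.inr (Or.inr (Or.inl h)))⟩, ⟨c,hc,Or.inr (Or.inr (Or.inr (Or.inr (Or.inl h))))⟩,
      ⟨c,hc,Or.inr (Or.inr (Or.inr (Or.inr (Or.inr h))))⟩]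

theorem pvA_iff (piece : List (Int × Int × Int)) :
    has_forbidden_2x3_plane piece = true ↔
      (pvHasTemplate piece [(0,0,0),(1,0,0),(0,1,0),(1,1,0),(0,2,0),(1,2,0)] ∨
       pvHasTemplate piece [(0,0,0),(1,0,0),(2,0,0),(0,1,0),(1,1,0),(2,1,0)] ∨
       pvHasTemplate piece [(0,0,0),(0,1,0),(0,2,0),(0,0,1),(0,1,1),(0,2,1)] ∨
       pvHasTemplate piece [(0,0,0),(1,0,0),(0,0,1),(1,0,1),(0,0,2),(1,0,2)] ∨
       pvHasTemplate piece [(0,0,0),(1,0,0),(2,0,0),(0,0,1),(1,0,1),(2,0,1)]) := by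
  simp only [has_forbidden_2x3_plane, pvHasTemplate, List.any_eq_true, PySem.List.mem_pyRange_one,
    List.all_cons, List.all_nil, Bool.or_eq_true, Bool.and_eq_true, and_true,
    PySem.Set.contains_iff, PySem.Set.mem_ofList,
    List.forall_mem_cons, List.not_mem_nil, false_implies, forall_const, add_zero]
  constructor
  · rintro ((⟨z,-,(⟨x0,-,y0,-,m1,m2,m3,m4,m5,m6⟩|⟨x0,-,y0,-,m1,m2,m3,m4,m5,m6⟩)⟩|⟨x,-,(⟨y0,-,z0,-,m1,m2,m3,m4,m5,m6⟩|⟨y0,-,z0,-,m1,m2,m3,m4,m5,m6⟩)⟩)|⟨y,-,(⟨x0,-,z0,-,m1,m2,m3,m4,m5,m6⟩|⟨x0,-,z0,-,m1,m2,m3,m4,m5,m6⟩)⟩)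
    · exact Or.inl ⟨((x0,y0,z) : Int × Int × Int), m1, m1, m2, m3, m4, m5, m6⟩
    · exact Or.inr (Or.inl ⟨((x0,y0,z) : Int × Int × Int), m1, m1, m2, m3, m4, m5, m6⟩)
    · exact Or.inr (Or.inr (Or.inl ⟨((x,y0,z0) : Int × Int × Int), m1, m1, m2, m3, m4, m5, m6⟩))
    · exact Or.inr (Or.inr (Or.inl ⟨((x,y0,z0) : Int × Int × Int), m1, m1, m2, m3, m4, m5, m6⟩))
    · exact Or.inr (Or.inr (Or.inr (Or.inl ⟨((x0,y,z0) : Int × Int × Int), m1, m1, m2, m3, m4, m5, m6⟩)))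
    · exact Or.inr (Or.inr (Or.inr (Or.inr ⟨((x0,y,z0) : Int × Int × Int), m1, m1, m2, m3, m4, m5, m6⟩)))
  · rintro (⟨⟨x,y,z⟩,hc,m1,m2,m3,m4,m5,m6⟩|⟨⟨x,y,z⟩,hc,m1,m2,m3,m4,m5,m6⟩|⟨⟨x,y,z⟩,hc,m1,m2,m3,m4,m5,m6⟩|⟨⟨x,y,z⟩,hc,m1,m2,m3,m4,m5,m6⟩|⟨⟨x,y,z⟩,hc,m1,m2,m3,m4,m5,m6⟩)
    · have a1 := pvMin_le (pv_mem_coord hc (fun c => c.1))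
      have a2 := pvMin_le (pv_mem_coord hc (fun c => c.2.1))
      have a3 := pvMin_le (pv_mem_coord hc (fun c => c.2.2))
      have b1 := le_pvMax (pv_mem_coord m6 (fun c => c.1))
      have b2 := le_pvMax (pv_mem_coord m6 (fun c => c.2.1))
      have b3 := le_pvMax (pv_mem_coord m6 (fun c => c.2.2))
      dsimp only at a1 a2 a3 b1 b2 b3
      refine Or.inl (Or.inl ⟨z, ⟨?_, ?_⟩, Or.inl ⟨x, ⟨?_, ?_⟩, y, ⟨?_, ?_⟩, m1, m2, m3, m4, m5, m6⟩⟩) <;> omega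
    · have a1 := pvMin_le (pv_mem_coord hc (fun c => c.1))
      have a2 := pvMin_le (pv_mem_coord hc (fun c => c.2.1))
      have a3 := pvMin_le (pv_mem_coord hc (fun c => c.2.2))
      have b1 := le_pvMax (pv_mem_coord m6 (fun c => c.1))
      have b2 := le_pvMax (pv_mem_coord m6 (fun c => c.2.1))
      have b3 := le_pvMax (pv_mem_coord m6 (fun c => c.2.2))
      dsimp only at a1 a2 a3 b1 b2 b3
      refine Or.inl (Or.inl ⟨z, ⟨?_, ?_⟩, Or.inr ⟨x, ⟨?_, ?_⟩, y, ⟨?_, ?_⟩, m1, m2, m3, m4, m5, m6⟩⟩) <;> omega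
    · have a1 := pvMin_le (pv_mem_coord hc (fun c => c.1))
      have a2 := pvMin_le (pv_mem_coord hc (fun c => c.2.1))
      have a3 := pvMin_le (pv_mem_coord hc (fun c => c.2.2))
      have b1 := le_pvMax (pv_mem_coord m6 (fun c => c.1))
      have b2 := le_pvMax (pv_mem_coord m6 (fun c => c.2.1))
      have b3 := le_pvMax (pv_mem_coord m6 (fun c => c.2.2))
      dsimp only at a1 a2 a3 b1 b2 b3
      refine Or.inl (Or.inr ⟨x, ⟨?_, ?_⟩, Or.inr ⟨y, ⟨?_, ?_⟩, z, ⟨?_, ?_⟩, m1, m2, m3, m4, m5, m6⟩⟩) <;> omega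
    · have a1 := pvMin_le (pv_mem_coord hc (fun c => c.1))
      have a2 := pvMin_le (pv_mem_coord hc (fun c => c.2.1))
      have a3 := pvMin_le (pv_mem_coord hc (fun c => c.2.2))
      have b1 := le_pvMax (pv_mem_coord m6 (fun c => c.1))
      have b2 := le_pvMax (pv_mem_coord m6 (fun c => c.2.1))
      have b3 := le_pvMax (pv_mem_coord m6 (fun c => c.2.2))
      dsimp only at a1 a2 a3 b1 b2 b3
      refine Or.inr ⟨y, ⟨?_, ?_⟩, Or.inl ⟨x, ⟨?_, ?_⟩, z, ⟨?_, ?_⟩, m1, m2, m3, m4, m5, m6⟩⟩ <;> omega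
    · have a1 := pvMin_le (pv_mem_coord hc (fun c => c.1))
      have a2 := pvMin_le (pv_mem_coord hc (fun c => c.2.1))
      have a3 := pvMin_le (pv_mem_coord hc (fun c => c.2.2))
      have b1 := le_pvMax (pv_mem_coord m6 (fun c => c.1))
      have b2 := le_pvMax (pv_mem_coord m6 (fun c => c.2.1))
      have b3 := le_pvMax (pv_mem_coord m6 (fun c => c.2.2))
      dsimp only at a1 a2 a3 b1 b2 b3
      refine Or.inr ⟨y, ⟨?_, ?_⟩, Or.inr ⟨x, ⟨?_, ?_⟩, z, ⟨?_, ?_⟩, m1, m2, m3, m4, m5, m6⟩⟩ <;> omega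

-- ===== VERDICT (by name: the statement is the Claim_ definition above) =====
theorem has_forbidden_2x3_plane_spec : Claim_unchanged_has_forbidden_2x3_plane := by
  intro piece _ hpre hnd
  rw [Bool.eq_iff_iff, pvA_iff piece, pvB_iff piece]
  unfold D_has_forbidden_2x3_plane at hnd
  rw [pvPlate_iff0, pvPlate_iff1, pvPlate_iff2, pvPlate_iff3, pvPlate_iff4, pvPlate_iff5] at hnd
  tauto

theorem has_forbidden_2x3_plane_changed : Claim_changed_has_forbidden_2x3_plane := by
  unfold Claim_changed_has_forbidden_2x3_plane; decide

theorem has_forbidden_2x3_plane_tight : Claim_exact_has_forbidden_2x3_plane := by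
  intro piece _ hpre hd
  obtain ⟨h3, hothers⟩ := hd
  rw [pvPlate_iff3] at h3
  rw [pvPlate_iff0, pvPlate_iff1, pvPlate_iff2, pvPlate_iff4, pvPlate_iff5] at hothers
  have hBtrue : has_forbidden_2x3_plane_alt piece = true := (pvB_iff piece).2 (by tauto)
  have hAfalse : has_forbidden_2x3_plane piece ≠ true := fun h => hothers ((pvA_iff piece).1 h)
  rw [hBtrue]; exact hAfalse
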